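-- pv_equiv track=rewrite | github.com/Vahid-Esmaeelzadeh/CTCI-Python | chapter1.py | countCompression
-- ===== SOURCE A (Python) =====
-- def countCompression(s):
--     comp_len = 0
--     consecutive_len = 0
--
--     for i in range(len(s)):
--         consecutive_len += 1
--         if i + 1 >= len(s) or s[i] != s[i+1]:
--             comp_len += 1 + len(str(consecutive_len))
--             consecutive_len = 0
--
--     return comp_len
-- ===== SOURCE B (Python) =====
-- def countCompression(s):
--     cuts = [i for i, (x, y) in enumerate(zip(s, s[1:]), 1) if x != y]
--     bounds = [0] + cuts + [len(s)] if s else [0]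
--     return sum(1 + len(str(b - a)) for a, b in zip(bounds, bounds[1:]))
-- ===== Notes on version B (the rewrite author's own statement) =====
-- stated objective: alternative
-- what changed: Replaced A's single pass with a run-length counter and reset branch by staged passes: first collect the change positions (cuts) via enumerate(zip(s, s[1:]), 1), then sum 1+len(str(b-a)) over adjacent boundary pairs of [0]+cuts+[len(s)], recovering run lengths by position subtraction instead of counting.
import Mathlib
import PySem

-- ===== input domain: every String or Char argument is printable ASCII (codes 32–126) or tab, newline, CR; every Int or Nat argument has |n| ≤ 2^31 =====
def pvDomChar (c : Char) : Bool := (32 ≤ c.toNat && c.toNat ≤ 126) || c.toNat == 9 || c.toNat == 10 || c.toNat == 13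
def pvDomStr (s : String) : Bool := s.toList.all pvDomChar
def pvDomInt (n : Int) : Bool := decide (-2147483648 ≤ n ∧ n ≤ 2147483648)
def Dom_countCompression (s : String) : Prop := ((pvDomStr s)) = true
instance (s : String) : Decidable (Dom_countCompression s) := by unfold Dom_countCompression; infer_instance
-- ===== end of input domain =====

-- B replaces A's single pass with a run-length counter by staged passes: it first
-- collects the change positions (cuts), then sums 1 + digits(b - a) over adjacent
-- boundary pairs, recovering run lengths by position subtraction (objective: alternative).

-- ===== PORT A =====
-- literal port of A: for i in range(len(s)) over state (comp_len, consecutive_len);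
-- 'i+1 >= len(s) or s[i] != s[i+1]' via Option-valued pyGet? (exact: short-circuit keeps s[i+1] in range)
def countCompression (s : String) : Int :=
  let cs := s.toList
  let n : Int := PySem.Str.len s
  let res := (PySem.List.pyRange 0 n 1).foldl
    (fun (st : Int × Int) (i : Int) =>
      let k := st.2 + 1
      if n ≤ i + 1 ∨ PySem.List.pyGet? cs i ≠ PySem.List.pyGet? cs (i + 1) then
        (st.1 + 1 + PySem.Str.len (PySem.Int.toStr k), 0)
      else
        (st.1, k)) ((0 : Int), (0 : Int))
  res.1

-- ===== PORT B =====
-- literal port of Source B: zip(s, s[1:]) pairs adjacent characters (s[1:] = tail, exact for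
-- the nonnegative slice start), enumerate(..., 1) numbers them from 1; cuts are the
-- positions where the pair differs; bounds = [0] + cuts + [len(s)] (or [0] for empty s,
-- Python truthiness of s = cs ≠ []); the result sums 1 + len(str(b - a)) over adjacent
-- boundary pairs via zip(bounds, bounds[1:]).
def countCompression_alt (s : String) : Int :=
  let cs := s.toList
  let cuts := ((PySem.List.enumerate (List.zip cs cs.tail) 1).filter
      (fun p => p.2.1 != p.2.2)).map (·.1)
  let bounds := if cs = [] then [(0 : Int)] else (0 : Int) :: cuts ++ [(cs.length : Int)]
  (List.zip bounds bounds.tail).foldl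
    (fun acc p => acc + 1 + PySem.Str.len (PySem.Int.toStr (p.2 - p.1))) 0

-- ===== PRECONDITION & SPEC =====
def Spec_countCompression (s : String) (out : Int) : Prop := out = countCompression_alt s
instance (s : String) (out : Int) : Decidable (Spec_countCompression s out) := by unfold Spec_countCompression; infer_instance

-- ===== CLAIM (what is proved, stated in full; the proofs are below) =====
def Claim_equal_countCompression : Prop := ∀ (s : String), Dom_countCompression s → Spec_countCompression s (countCompression s)

-- ===== LEMMAS AND PROOFS =====

-- list-level recursion equivalent to A's loop (proof helper)
def ccAux : List Char → Int × Int → Int × Int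
  | [], st => st
  | [_], st => (st.1 + 1 + PySem.Str.len (PySem.Int.toStr (st.2 + 1)), 0)
  | c :: d :: r, st =>
    if c ≠ d then ccAux (d :: r) (st.1 + 1 + PySem.Str.len (PySem.Int.toStr (st.2 + 1)), 0)
    else ccAux (d :: r) (st.1, st.2 + 1)

-- the cut positions of B, as a structural recursion (proof helper)
def cutsOf : Char → List Char → Int → List Int
  | _, [], _ => []
  | c, d :: r, i => if c = d then cutsOf d r (i + 1) else i :: cutsOf d r (i + 1)

-- B's adjacent-pair sum, as a structural recursion (proof helper)
def pairSum : Int → List Int → Int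
  | _, [] => 0
  | a, b :: l => 1 + PySem.Str.len (PySem.Int.toStr (b - a)) + pairSum b l

theorem cuts_eq : ∀ (t : List Char) (c : Char) (i : Int),
    ((PySem.List.enumerate (List.zip (c :: t) t) i).filter
      (fun p => p.2.1 != p.2.2)).map (·.1) = cutsOf c t i := by
  intro t
  induction t with
  | nil => intro c i; simp [cutsOf]
  | cons d r ih =>
    intro c i
    by_cases h : c = d
    · simp [PySem.List.enumerate_cons, h, cutsOf, ih]
    · simp [PySem.List.enumerate_cons, h, cutsOf, ih]

theorem foldl_zip_pairSum : ∀ (l : List Int) (a acc : Int),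
    (List.zip (a :: l) l).foldl
      (fun acc p => acc + 1 + PySem.Str.len (PySem.Int.toStr (p.2 - p.1))) acc
    = acc + pairSum a l := by
  intro l
  induction l with
  | nil => intro a acc; simp [pairSum]
  | cons b m ih =>
    intro a acc
    simp only [List.zip_cons_cons, List.foldl_cons, pairSum, ih]
    ring

theorem ccAux_fst_add : ∀ (l : List Char) (acc k : Int),
    (ccAux l (acc, k)).1 = acc + (ccAux l (0, k)).1 := by
  intro l
  induction l with
  | nil => intro acc k; simp [ccAux]
  | cons c t ih =>
    intro acc k
    cases t with
    | nil => simp [ccAux]; ring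
    | cons d r =>
      by_cases h : c = d
      · simp only [ccAux, h, ne_eq, not_true_eq_false, if_false]
        exact ih acc (k + 1)
      · have hne : c ≠ d := h
        simp only [ccAux, ne_eq, hne, not_false_iff, if_pos]
        rw [ih (acc + 1 + PySem.Str.len (PySem.Int.toStr (k + 1))) 0,
            ih (0 + 1 + PySem.Str.len (PySem.Int.toStr (k + 1))) 0]
        ring

theorem pairSum_cuts_eq_ccAux : ∀ (t : List Char) (c : Char) (a j : Int),
    pairSum (a - j) (cutsOf c t (a + 1) ++ [a + 1 + (t.length : Int)])
      = (ccAux (c :: t) (0, j)).1 := by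
  intro t
  induction t with
  | nil =>
    intro c a j
    have h : a + 1 + ((0 : Nat) : Int) - (a - j) = j + 1 := by push_cast; ring
    simp only [cutsOf, List.nil_append, pairSum, ccAux, List.length_nil]
    rw [h]; ring
  | cons d r ih =>
    intro c a j
    have hlen : a + 1 + (((d :: r).length : Nat) : Int) = (a + 1) + 1 + (r.length : Int) := by
      simp [List.length_cons]; ring
    by_cases h : c = d
    · have h1 : a - j = (a + 1) - (j + 1) := by ring
      simp only [cutsOf, if_pos h, hlen]
      rw [h1]
      have := ih d (a + 1) (j + 1)
      rw [this]
      simp [ccAux, h]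
    · have h2 : a + 1 - (a - j) = j + 1 := by ring
      simp only [cutsOf, if_neg h, List.cons_append, pairSum, hlen, h2]
      have h4 := ih d (a + 1) 0
      rw [show (a + 1 : Int) - 0 = a + 1 from by ring] at h4
      rw [h4]
      have hne : c ≠ d := h
      simp only [ccAux, ne_eq, hne, not_false_iff, if_pos]
      rw [ccAux_fst_add (d :: r) (0 + 1 + PySem.Str.len (PySem.Int.toStr (j + 1))) 0]
      ring

theorem foldA_eq_ccAux : ∀ (suf pre full : List Char) (n : Int) (st : Int × Int),
    full = pre ++ suf → n = (full.length : Int) →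
    (PySem.List.pyRange (pre.length : Int) n 1).foldl
      (fun (st : Int × Int) (i : Int) =>
        let k := st.2 + 1
        if n ≤ i + 1 ∨ PySem.List.pyGet? full i ≠ PySem.List.pyGet? full (i + 1) then
          (st.1 + 1 + PySem.Str.len (PySem.Int.toStr k), 0)
        else
          (st.1, k)) st = ccAux suf st := by
  intro suf
  induction suf with
  | nil =>
    intro pre full n st hfull hn
    subst hfull
    have : n = (pre.length : Int) := by simpa using hn
    rw [this, PySem.List.pyRange_one_eq_nil le_rfl]
    simp [ccAux]
  | cons c t ih =>
    intro pre full n st hfull hn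
    have hlen : n = (pre.length : Int) + t.length + 1 := by
      subst hfull; simp at hn; push_cast [hn]; ring
    have hcons : PySem.List.pyRange (pre.length : Int) n 1 =
        (pre.length : Int) :: PySem.List.pyRange ((pre.length : Int) + 1) n 1 :=
      PySem.List.pyRange_one_cons (by omega)
    rw [hcons, List.foldl_cons]
    have h1 : PySem.List.pyGet? full ((pre.length : Int)) = some c := by
      subst hfull; exact PySem.List.pyGet?_append_length pre t c
    cases t with
    | nil =>
      have hb : n = (pre.length : Int) + 1 := by simpa using hlen
      rw [if_pos (Or.inl (by omega))]
      rw [show PySem.List.pyRange ((pre.length : Int) + 1) n 1 = [] from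
        PySem.List.pyRange_one_eq_nil (by omega)]
      simp [ccAux]
    | cons d r =>
      have hb : n = (pre.length : Int) + (r.length : Int) + 2 := by
        simp at hlen; omega
      have hfull' : full = (pre ++ [c]) ++ d :: r := by
        simp [hfull]
      have h2 : PySem.List.pyGet? full ((pre.length : Int) + 1) = some d := by
        have := PySem.List.pyGet?_append_length (pre ++ [c]) r d
        rw [← hfull'] at this
        simpa using this
      have hlenpre : (((pre ++ [c]).length : Nat) : Int) = (pre.length : Int) + 1 := by
        simp
      by_cases hcd : c = d
      · rw [if_neg (by
          rw [h1, h2, hcd]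
          intro hor
          rcases hor with hle | hne
          · omega
          · exact hne rfl)]
        have := ih (pre ++ [c]) full n (st.1, st.2 + 1) hfull' hn
        rw [hlenpre] at this
        rw [this]
        simp only [ccAux, ne_eq, hcd, not_true_eq_false, if_false]
      · rw [if_pos (Or.inr (by rw [h1, h2]; simp [hcd]))]
        have := ih (pre ++ [c]) full n
          (st.1 + 1 + PySem.Str.len (PySem.Int.toStr (st.2 + 1)), 0) hfull' hn
        rw [hlenpre] at this
        rw [this]
        simp only [ccAux, ne_eq, hcd, not_false_iff, if_pos]

theorem alt_eq_ccAux (s : String) :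
    countCompression_alt s =
      (match s.toList with
       | [] => (0 : Int)
       | c :: t => (ccAux (c :: t) (0, 0)).1) := by
  unfold countCompression_alt
  cases hcs : s.toList with
  | nil => simp
  | cons c t =>
    simp only [List.tail_cons, if_neg (List.cons_ne_nil c t)]
    rw [cuts_eq t c 1]
    rw [show ((0 : Int) :: cutsOf c t 1 ++ [(((c :: t).length : Nat) : Int)]).tail
        = cutsOf c t 1 ++ [(((c :: t).length : Nat) : Int)] from rfl]
    rw [List.cons_append]
    have hfz := foldl_zip_pairSum (cutsOf c t 1 ++ [((c :: t).length : Int)]) 0 0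
    rw [hfz]
    have hp := pairSum_cuts_eq_ccAux t c 0 0
    norm_num at hp
    rw [show (((c :: t).length : Nat) : Int) = 1 + (t.length : Int) from by
      simp [List.length_cons]; ring]
    rw [zero_add, hp]

theorem countCompression_spec : Claim_equal_countCompression := by
  intro s _
  unfold Spec_countCompression
  rw [alt_eq_ccAux]
  simp only [countCompression]
  cases hcs : s.toList with
  | nil =>
    have hn : PySem.Str.len s = 0 := by
      simp [PySem.Str.len_eq, hcs]
    rw [hn, PySem.List.pyRange_one_eq_nil le_rfl]
    simp
  | cons c t =>
    have hn : PySem.Str.len s = ((c :: t).length : Int) := by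
      simp [PySem.Str.len_eq, hcs]
    have hL := foldA_eq_ccAux (c :: t) [] (c :: t) (PySem.Str.len s)
      ((0 : Int), (0 : Int)) (by simp) (by simpa using hn)
    simp only [List.length_nil, Nat.cast_zero] at hL
    rw [hL]
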